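-- pv_equiv track=rewrite | github.com/Keiracom/Agency_OS | src/orchestration/flows/pool_population_flow.py | parse_employee_range
-- ===== SOURCE A (Python) =====
-- COMPANY_SIZE_MAP = {
--     "1-10": (1, 10),
--     "11-50": (11, 50),
--     "51-200": (51, 200),
--     "201-500": (201, 500),
--     "501-1000": (501, 1000),
--     "1001-5000": (1001, 5000),
--     "5001-10000": (5001, 10000),
--     "10001+": (10001, 1000000),
--     # Alternative formats
--     "small": (1, 50),
--     "medium": (51, 500),
--     "large": (501, 5000),
--     "enterprise": (5001, 1000000),
--     "smb": (1, 200),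
--     "mid-market": (201, 1000),
-- }
--
-- def parse_employee_range(company_sizes: list[str]) -> tuple[int | None, int | None]:
--     """
--     Parse company size strings into min/max employee counts.
--
--     Args:
--         company_sizes: List of company size strings
--
--     Returns:
--         Tuple of (min_employees, max_employees)
--     """
--     if not company_sizes:
--         return None, None
--
--     min_employees = None
--     max_employees = None
--
--     for size in company_sizes:
--         size_lower = size.lower().strip()
--
--         # Check direct mapping
--         if size_lower in COMPANY_SIZE_MAP:
--             range_min, range_max = COMPANY_SIZE_MAP[size_lower]
--             if min_employees is None or range_min < min_employees:
--                 min_employees = range_min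
--             if max_employees is None or range_max > max_employees:
--                 max_employees = range_max
--             continue
--
--         # Try to parse numeric range like "100-500"
--         if "-" in size:
--             try:
--                 parts = size.split("-")
--                 range_min = int(parts[0].strip().replace(",", ""))
--                 range_max = int(parts[1].strip().replace(",", "").replace("+", ""))
--                 if min_employees is None or range_min < min_employees:
--                     min_employees = range_min
--                 if max_employees is None or range_max > max_employees:
--                     max_employees = range_max
--             except (ValueError, IndexError):
--                 pass
--
--     return min_employees, max_employees
-- ===== SOURCE B (Python) =====
-- COMPANY_SIZE_MAP = {
--     "1-10": (1, 10),
--     "11-50": (11, 50),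
--     "51-200": (51, 200),
--     "201-500": (201, 500),
--     "501-1000": (501, 1000),
--     "1001-5000": (1001, 5000),
--     "5001-10000": (5001, 10000),
--     "10001+": (10001, 1000000),
--     "small": (1, 50),
--     "medium": (51, 500),
--     "large": (501, 5000),
--     "enterprise": (5001, 1000000),
--     "smb": (1, 200),
--     "mid-market": (201, 1000),
-- }
--
--
-- def _classify(size):
--     """Map one size string to a (lo, hi) pair, or None if unrecognised."""
--     key = size.lower().strip()
--     if key in COMPANY_SIZE_MAP:
--         return COMPANY_SIZE_MAP[key]
--     if "-" in size:
--         parts = size.split("-")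
--         try:
--             lo = int(parts[0].strip().replace(",", ""))
--             hi = int(parts[1].strip().replace(",", "").replace("+", ""))
--             return (lo, hi)
--         except (ValueError, IndexError):
--             return None
--     return None
--
--
-- def _merge(a, b):
--     """Merge two (min, max) Option-bound pairs; associative and commutative."""
--     return (b[0] if a[0] is None else a[0] if b[0] is None else min(a[0], b[0]),
--             b[1] if a[1] is None else a[1] if b[1] is None else max(a[1], b[1]))
--
--
-- def parse_employee_range(company_sizes):
--     # Divide and conquer: bounds of each half, merged. The merge is associative
--     # and commutative, so this equals A's left-to-right running min/max.
--     if len(company_sizes) <= 1: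
--         if not company_sizes:
--             return None, None
--         p = _classify(company_sizes[0])
--         return (None, None) if p is None else p
--     mid = len(company_sizes) // 2
--     return _merge(parse_employee_range(company_sizes[:mid]),
--                   parse_employee_range(company_sizes[mid:]))
-- ===== Notes on version B (the rewrite author's own statement) =====
-- stated objective: alternative
-- what changed: A's single imperative pass threading mutable Option min/max accumulators is replaced by divide-and-conquer: classify a singleton at the leaves, split longer lists in half and combine the two halves' bound pairs with an associative/commutative option-min/option-max merge.
import Mathlib
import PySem

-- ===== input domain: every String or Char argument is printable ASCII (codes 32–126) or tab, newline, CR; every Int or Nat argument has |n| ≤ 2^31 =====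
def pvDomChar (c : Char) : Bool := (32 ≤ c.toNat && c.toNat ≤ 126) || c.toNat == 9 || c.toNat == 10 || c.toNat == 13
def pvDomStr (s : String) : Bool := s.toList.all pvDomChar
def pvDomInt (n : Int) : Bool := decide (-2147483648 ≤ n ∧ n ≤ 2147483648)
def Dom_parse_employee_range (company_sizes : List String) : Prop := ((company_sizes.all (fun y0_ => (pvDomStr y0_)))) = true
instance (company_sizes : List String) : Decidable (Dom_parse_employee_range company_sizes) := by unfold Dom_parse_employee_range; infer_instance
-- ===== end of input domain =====

-- B replaces A's imperative loop over mutable Option min/max accumulators by divide-and-conquer: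
-- classify singletons, split in half and combine with an associative/commutative bound merge.


-- shared module-level constant COMPANY_SIZE_MAP (a Python dict literal, insertion order)
def pvSizeMap : PySem.Dict String (Int × Int) := PySem.Dict.mk
  [("1-10", (1, 10)), ("11-50", (11, 50)), ("51-200", (51, 200)), ("201-500", (201, 500)),
   ("501-1000", (501, 1000)), ("1001-5000", (1001, 5000)), ("5001-10000", (5001, 10000)),
   ("10001+", (10001, 1000000)), ("small", (1, 50)), ("medium", (51, 500)), ("large", (501, 5000)),
   ("enterprise", (5001, 1000000)), ("smb", (1, 200)), ("mid-market", (201, 1000))]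

-- shared int(parts[0].strip().replace(",", "")) resp. int(parts[1].strip().replace(",", "").replace("+", ""))
def pvParse0 (parts : List String) : Option Int :=
  (PySem.List.pyGet? parts 0).bind fun p =>
    PySem.Int.ofStr? (PySem.Str.replace (PySem.Str.strip p) "," "")
def pvParse1 (parts : List String) : Option Int :=
  (PySem.List.pyGet? parts 1).bind fun p =>
    PySem.Int.ofStr? (PySem.Str.replace (PySem.Str.replace (PySem.Str.strip p) "," "") "+" "")

-- ===== PORT A =====
-- the two 'if … is None or …' accumulator updates of A's loop body
def pvUpd (st : Option Int × Option Int) (rmin rmax : Int) : Option Int × Option Int :=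
  ((match st.1 with
    | none => some rmin
    | some m => if rmin < m then some rmin else some m),
   (match st.2 with
    | none => some rmax
    | some M => if rmax > M then some rmax else some M))

-- one iteration of A's 'for size in company_sizes' loop
def pvStepA (st : Option Int × Option Int) (size : String) : Option Int × Option Int :=
  let size_lower := PySem.Str.strip (PySem.Str.lower size)
  match pvSizeMap.get? size_lower with
  | some (rmin, rmax) => pvUpd st rmin rmax
  | none =>
    if PySem.Str.isIn "-" size then
      let parts := (PySem.Str.split? size "-").getD []   -- split? is some for sep "-" ≠ ""
      match pvParse0 parts with
      | none => st                          -- except (ValueError, IndexError): pass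
      | some rmin =>
        match pvParse1 parts with
        | none => st                        -- exception before any update
        | some rmax => pvUpd st rmin rmax
    else st

def parse_employee_range (company_sizes : List String) : Option Int × Option Int :=
  if company_sizes = [] then (none, none)
  else company_sizes.foldl pvStepA (none, none)

-- ===== PORT B =====
-- _classify: one size string ↦ some (lo, hi) or none
def pvClassify (size : String) : Option (Int × Int) :=
  let key := PySem.Str.strip (PySem.Str.lower size)
  match pvSizeMap.get? key with
  | some p => some p
  | none =>
    if PySem.Str.isIn "-" size then
      let parts := (PySem.Str.split? size "-").getD []   -- split? is some for sep "-" ≠ ""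
      match pvParse0 parts, pvParse1 parts with
      | some lo, some hi => some (lo, hi)
      | _, _ => none
    else none

-- _merge: combine two Option-bound pairs (associative and commutative)
def pvMerge (a b : Option Int × Option Int) : Option Int × Option Int :=
  ((match a.1, b.1 with
    | none, x => x | some m, none => some m | some m, some n => some (min m n)),
   (match a.2, b.2 with
    | none, x => x | some M, none => some M | some M, some N => some (max M N)))

-- divide and conquer of Source B: singleton leaves classified, halves merged
def parse_employee_range_alt (company_sizes : List String) : Option Int × Option Int :=
  if h : company_sizes.length ≤ 1 then
    match company_sizes with
    | [] => (none, none)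
    | s :: _ =>
      match pvClassify s with
      | none => (none, none)
      | some (lo, hi) => (some lo, some hi)
  else
    let mid := company_sizes.length / 2
    pvMerge (parse_employee_range_alt (company_sizes.take mid))
            (parse_employee_range_alt (company_sizes.drop mid))
termination_by company_sizes.length
decreasing_by all_goals simp [List.length_take, List.length_drop]; omega

-- ===== PRECONDITION & SPEC =====
def Spec_parse_employee_range (company_sizes : List String) (out : Option Int × Option Int) : Prop := out = parse_employee_range_alt company_sizes
instance (company_sizes : List String) (out : Option Int × Option Int) : Decidable (Spec_parse_employee_range company_sizes out) := by unfold Spec_parse_employee_range; infer_instance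

-- ===== CLAIM (what is proved, stated in full; the proofs are below) =====
def Claim_equal_parse_employee_range : Prop := ∀ (company_sizes : List String), Dom_parse_employee_range company_sizes → Spec_parse_employee_range company_sizes (parse_employee_range company_sizes)

-- ===== LEMMAS AND PROOFS =====

-- a single string's contribution as an Option-bound pair
def pvCls1 (size : String) : Option Int × Option Int :=
  match pvClassify size with
  | none => (none, none)
  | some (lo, hi) => (some lo, some hi)

-- both programs compute this right fold of merged contributions
def pvG (xs : List String) : Option Int × Option Int :=
  xs.foldr (fun s acc => pvMerge (pvCls1 s) acc) (none, none)

theorem merge_none_left (a : Option Int × Option Int) : pvMerge (none, none) a = a := by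
  obtain ⟨x, y⟩ := a; rfl

theorem merge_none_right (a : Option Int × Option Int) : pvMerge a (none, none) = a := by
  obtain ⟨x, y⟩ := a
  cases x <;> cases y <;> rfl

theorem merge_assoc (a b c : Option Int × Option Int) :
    pvMerge (pvMerge a b) c = pvMerge a (pvMerge b c) := by
  obtain ⟨a1, a2⟩ := a; obtain ⟨b1, b2⟩ := b; obtain ⟨c1, c2⟩ := c
  cases a1 <;> cases b1 <;> cases c1 <;> cases a2 <;> cases b2 <;> cases c2 <;>
    simp [pvMerge, min_assoc, max_assoc]

-- A's loop body is 'merge the current state with the string's contribution'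
theorem stepA_merge (st : Option Int × Option Int) (size : String) :
    pvStepA st size = pvMerge st (pvCls1 size) := by
  simp only [pvStepA, pvCls1, pvClassify]
  cases hget : pvSizeMap.get? (PySem.Str.strip (PySem.Str.lower size)) with
  | some p =>
    obtain ⟨lo, hi⟩ := p
    obtain ⟨a, b⟩ := st
    simp only [pvUpd, pvMerge, Prod.mk.injEq]
    constructor <;> (cases a <;> cases b) <;> simp <;> split_ifs <;> (simp only [Option.some.injEq]; omega)
  | none =>
    by_cases h : PySem.Str.isIn "-" size = true
    · simp only [h, if_true]
      cases h0 : pvParse0 ((PySem.Str.split? size "-").getD []) with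
      | none => exact (merge_none_right st).symm
      | some lo =>
        cases h1 : pvParse1 ((PySem.Str.split? size "-").getD []) with
        | none => exact (merge_none_right st).symm
        | some hi =>
          obtain ⟨a, b⟩ := st
          simp only [pvUpd, pvMerge, Prod.mk.injEq]
          constructor <;> (cases a <;> cases b) <;> simp <;> split_ifs <;> (simp only [Option.some.injEq]; omega)
    · simp only [eq_false_of_ne_true h]
      exact (merge_none_right st).symm

theorem foldr_merge (xs : List String) (y : Option Int × Option Int) :
    xs.foldr (fun s acc => pvMerge (pvCls1 s) acc) y = pvMerge (pvG xs) y := by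
  induction xs with
  | nil => exact (merge_none_left y).symm
  | cons x xs ih =>
    simp only [List.foldr_cons, ih, pvG, merge_assoc]

theorem g_append (l1 l2 : List String) : pvG (l1 ++ l2) = pvMerge (pvG l1) (pvG l2) := by
  simp only [pvG, List.foldr_append]
  exact foldr_merge l1 _

-- B computes pvG
theorem alt_eq_g (xs : List String) : parse_employee_range_alt xs = pvG xs := by
  induction hn : xs.length using Nat.strong_induction_on generalizing xs with
  | _ n ih =>
    rw [parse_employee_range_alt]
    by_cases h : xs.length ≤ 1
    · simp only [h, dif_pos]
      match xs with
      | [] => rfl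
      | [s] =>
        simp only [pvG, List.foldr_cons, List.foldr_nil, merge_none_right, pvCls1]
      | a :: b :: t => simp at h
    · simp only [h, dif_neg, not_false_iff]
      have h2 : 2 ≤ xs.length := by omega
      have ht : (xs.take (xs.length / 2)).length = xs.length / 2 := by
        simp [List.length_take]; omega
      have hd : (xs.drop (xs.length / 2)).length = xs.length - xs.length / 2 := by
        simp [List.length_drop]
      rw [ih _ (by omega) _ ht, ih _ (by omega) _ hd, ← g_append, List.take_append_drop]

-- A computes 'merge the start state with pvG'
theorem foldA_g (xs : List String) (st : Option Int × Option Int) :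
    xs.foldl pvStepA st = pvMerge st (pvG xs) := by
  induction xs generalizing st with
  | nil => exact (merge_none_right st).symm
  | cons x xs ih =>
    simp only [List.foldl_cons, stepA_merge, ih, pvG, List.foldr_cons, merge_assoc]

-- ===== VERDICT (by name: the statement is the Claim_ definition above) =====
theorem parse_employee_range_spec : Claim_equal_parse_employee_range := by
  intro xs _
  unfold Spec_parse_employee_range parse_employee_range
  rw [alt_eq_g]
  by_cases h : xs = []
  · subst h; rfl
  · simp only [h, if_false, foldA_g, merge_none_left]
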